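-- pv_equiv track=rewrite | github.com/sgfn/miscellaneous | uni/s1_wdi/3-16.py | ex16
-- ===== SOURCE A (Python) =====
-- def ex16(t):
--     n = len(t)
--     t_max = t[0]
--     t_min = t[0]
--     t_max_cnt = 1
--     t_min_cnt = 1
--     for i in range(1, n):
--         if t[i] == t_max:
--             t_max_cnt += 1
--         if t[i] == t_min:
--             t_min_cnt += 1
--         elif t[i] > t_max:
--             t_max = t[i]
--             t_max_cnt = 1
--         elif t[i] < t_min:
--             t_min = t[i]
--             t_min_cnt = 1
--     if t_max_cnt == 1 and t_min_cnt == 1: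
--         return True
--     else:
--         return False
-- ===== SOURCE B (Python) =====
-- def ex16(t):
--     return t.count(max(t)) == 1 and t.count(min(t)) == 1
-- ===== Notes on version B (the rewrite author's own statement) =====
-- stated objective: simpler
-- what changed: Replaces the fused single-pass max/min/count state machine with max(t), min(t) and two t.count calls.
-- outside the precondition, e.g. on ex16([]): A raises IndexError, B raises ValueError
import Mathlib
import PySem

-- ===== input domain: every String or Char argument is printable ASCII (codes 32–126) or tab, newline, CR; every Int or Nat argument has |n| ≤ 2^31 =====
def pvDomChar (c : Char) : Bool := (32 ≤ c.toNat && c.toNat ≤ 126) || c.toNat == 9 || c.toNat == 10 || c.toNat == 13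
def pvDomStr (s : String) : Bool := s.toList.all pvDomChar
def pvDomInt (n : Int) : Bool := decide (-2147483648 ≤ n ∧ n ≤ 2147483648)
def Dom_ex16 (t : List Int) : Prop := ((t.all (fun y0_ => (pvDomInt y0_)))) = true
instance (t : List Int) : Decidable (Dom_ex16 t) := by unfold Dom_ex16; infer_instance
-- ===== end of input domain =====

-- B replaces A's fused single-pass max/min/count state machine with max(t), min(t) and two counts: simpler.

-- ===== PORT A =====
-- the loop body: 'if t[i]==t_max: t_max_cnt+=1' followed by the if/elif/elif chain on t_min/t_max
def ex16Step (s : Int × Int × Int × Int) (ti : Int) : Int × Int × Int × Int :=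
  let tmax := s.1; let tmin := s.2.1; let cmax := s.2.2.1; let cmin := s.2.2.2
  let cmax := if ti = tmax then cmax + 1 else cmax
  if ti = tmin then (tmax, tmin, cmax, cmin + 1)
  else if ti > tmax then (ti, tmin, 1, cmin)
  else if ti < tmin then (tmax, ti, cmax, 1)
  else (tmax, tmin, cmax, cmin)

def ex16 (t : List Int) : Bool :=
  let n : Int := PySem.List.len t
  let t0 : Int := (PySem.List.pyGet? t 0).getD 0   -- t[0]; none (IndexError on []) is excluded by Pre_
  let s := (PySem.List.pyRange 1 n 1).foldl (fun acc j => ex16Step acc (PySem.List.pyGetD t j 0)) (t0, t0, 1, 1)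
  decide (s.2.2.1 = 1) && decide (s.2.2.2 = 1)

-- ===== PORT B =====
def ex16_alt (t : List Int) : Bool :=
  -- t.count(max(t)) == 1 and t.count(min(t)) == 1; max/min of [] (ValueError) is excluded by Pre_
  decide (PySem.List.count t ((PySem.List.max? t (fun y => y)).getD 0) = 1) &&
  decide (PySem.List.count t ((PySem.List.min? t (fun y => y)).getD 0) = 1)

-- ===== PRECONDITION & SPEC =====
-- Pre_ excludes only the empty list, on which A raises IndexError (t[0]) and B raises ValueError (max([])).
def Pre_ex16 (t : List Int) : Prop := t ≠ []
instance (t : List Int) : Decidable (Pre_ex16 t) := by unfold Pre_ex16; infer_instance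
def pvWitness_ex16 : List Int := [3, 1, 2]
def Spec_ex16 (t : List Int) (out : Bool) : Prop := out = ex16_alt t
instance (t : List Int) (out : Bool) : Decidable (Spec_ex16 t out) := by unfold Spec_ex16; infer_instance

-- ===== CLAIM (what is proved, stated in full; the proofs are below) =====
def Claim_equal_ex16 : Prop := ∀ (t : List Int), Dom_ex16 t → Pre_ex16 t → Spec_ex16 t (ex16 t)

-- ===== LEMMAS AND PROOFS =====

-- A's loop body, on any state (max, min, cntmax, cntmin) with min ≤ max.
theorem ex16Step_general (M MN cm cn y : Int) (hNM : MN ≤ M) :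
    ex16Step (M, MN, cm, cn) y
      = (max M y, min MN y,
         (if y = M then cm + 1 else if M < y then 1 else cm),
         (if y = MN then cn + 1 else if y < MN then 1 else cn)) := by
  simp only [ex16Step]
  split_ifs <;> simp_all [Prod.ext_iff, max_def, min_def] <;> omega

theorem count_snoc (p : List Int) (y v : Int) :
    (p ++ [y]).count v = p.count v + if y = v then 1 else 0 := by
  simp [List.count_append, List.count_cons]

-- One loop step preserves the invariant: after prefix x :: l the state is
-- (max, min, count of max, count of min) of that prefix.
theorem ex16_step_eq (l : List Int) (x y : Int) :
    ex16Step (l.foldl max x, l.foldl min x,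
      ((x :: l).count (l.foldl max x) : Int), ((x :: l).count (l.foldl min x) : Int)) y
  = ((l ++ [y]).foldl max x, (l ++ [y]).foldl min x,
      ((x :: (l ++ [y])).count ((l ++ [y]).foldl max x) : Int),
      ((x :: (l ++ [y])).count ((l ++ [y]).foldl min x) : Int)) := by
  obtain ⟨hxM, hlM⟩ := PySem.List.le_foldl_max l x
  obtain ⟨hxN, hlN⟩ := PySem.List.foldl_min_le l x
  have hNM : l.foldl min x ≤ l.foldl max x := le_trans hxN hxM
  rw [ex16Step_general _ _ _ _ _ hNM]
  have hamax : (l ++ [y]).foldl max x = max (l.foldl max x) y := by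
    rw [List.foldl_append]; rfl
  have hamin : (l ++ [y]).foldl min x = min (l.foldl min x) y := by
    rw [List.foldl_append]; rfl
  have hsnoc : ∀ v : Int, (x :: (l ++ [y])).count v = ((x :: l) ++ [y]).count v := by
    intro v; simp
  rw [hamax, hamin]
  simp only [Prod.mk.injEq]
  refine ⟨by trivial, by trivial, ?_, ?_⟩
  · by_cases hy : y = l.foldl max x
    · have hm : max (l.foldl max x) y = l.foldl max x := max_eq_left (le_of_eq hy)
      rw [hm, hsnoc, count_snoc]
      push_cast
      simp [hy]
    · by_cases hlt : l.foldl max x < y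
      · rw [max_eq_right (le_of_lt hlt), hsnoc, count_snoc]
        have h0 : (x :: l).count y = 0 := by
          rw [List.count_eq_zero]
          intro hmem
          rcases List.mem_cons.1 hmem with h | h
          · omega
          · exact absurd (hlM y h) (not_le.2 hlt)
        simp [hy, hlt, h0]
      · rw [max_eq_left (not_lt.1 hlt), hsnoc, count_snoc]
        simp [hy, hlt]
  · by_cases hy : y = l.foldl min x
    · have hm : min (l.foldl min x) y = l.foldl min x := min_eq_left (le_of_eq hy.symm)
      rw [hm, hsnoc, count_snoc]
      push_cast
      simp [hy]
    · by_cases hlt : y < l.foldl min x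
      · rw [min_eq_right (le_of_lt hlt), hsnoc, count_snoc]
        have h0 : (x :: l).count y = 0 := by
          rw [List.count_eq_zero]
          intro hmem
          rcases List.mem_cons.1 hmem with h | h
          · omega
          · exact absurd (hlN y h) (not_le.2 hlt)
        simp [hy, hlt, h0]
      · rw [min_eq_left (not_lt.1 hlt), hsnoc, count_snoc]
        simp [hy, hlt]

-- The full loop invariant, by induction on the remaining suffix.
theorem ex16_inv (xs : List Int) : ∀ (l : List Int) (x : Int),
    xs.foldl ex16Step
      (l.foldl max x, l.foldl min x,
       ((x :: l).count (l.foldl max x) : Int), ((x :: l).count (l.foldl min x) : Int))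
    = ((l ++ xs).foldl max x, (l ++ xs).foldl min x,
       ((x :: (l ++ xs)).count ((l ++ xs).foldl max x) : Int),
       ((x :: (l ++ xs)).count ((l ++ xs).foldl min x) : Int)) := by
  induction xs with
  | nil => intro l x; simp
  | cons y ys ih =>
    intro l x
    rw [List.foldl_cons, ex16_step_eq l x y, ih (l ++ [y]) x]
    simp

theorem ex16_eq_alt (t : List Int) (h : t ≠ []) : ex16 t = ex16_alt t := by
  obtain ⟨x, xs, rfl⟩ := List.exists_cons_of_ne_nil h
  have hfold := PySem.List.foldl_pyRange_pyGetD (xs := x :: xs) (a := 1) (d := 0)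
      (f := ex16Step) (init := (x, x, (1:Int), (1:Int))) (by norm_num)
  show (decide ((((PySem.List.pyRange 1 (PySem.List.len (x::xs)) 1).foldl
          (fun acc j => ex16Step acc (PySem.List.pyGetD (x::xs) j 0))
          (((PySem.List.pyGet? (x::xs) 0).getD 0), ((PySem.List.pyGet? (x::xs) 0).getD 0), 1, 1))).2.2.1 = 1)
        && decide ((((PySem.List.pyRange 1 (PySem.List.len (x::xs)) 1).foldl
          (fun acc j => ex16Step acc (PySem.List.pyGetD (x::xs) j 0))
          (((PySem.List.pyGet? (x::xs) 0).getD 0), ((PySem.List.pyGet? (x::xs) 0).getD 0), 1, 1))).2.2.2 = 1)) = _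
  have hget : (PySem.List.pyGet? (x::xs) 0).getD 0 = x := by
    simp [PySem.List.pyGet?, PySem.List.pyIdx?]
  have hdrop : ((x :: xs).drop (1:Int).toNat) = xs := by simp
  have h0 := ex16_inv xs [] x
  simp only [List.foldl_nil, List.nil_append, List.count_cons_self, List.count_nil] at h0
  have h0' : xs.foldl ex16Step (x, x, 1, 1)
      = (xs.foldl max x, xs.foldl min x,
         ((x :: xs).count (xs.foldl max x) : Int), ((x :: xs).count (xs.foldl min x) : Int)) := by
    simpa using h0
  rw [hget, hfold, hdrop, h0']
  show (decide (((x :: xs).count (xs.foldl max x) : Int) = 1)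
        && decide (((x :: xs).count (xs.foldl min x) : Int) = 1)) = _
  unfold ex16_alt
  rw [PySem.List.max?_id_cons, PySem.List.min?_id_cons]
  simp [PySem.List.count_eq]
  rfl

-- ===== VERDICT (by name: the statement is the Claim_ definition above) =====
theorem ex16_spec : Claim_equal_ex16 := by
  intro t _ hpre
  unfold Spec_ex16
  exact ex16_eq_alt t hpre
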